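-- pv_equiv track=rewrite | github.com/pazz/alot | alot/helper.py | string_sanitize
-- ===== SOURCE A (Python) =====
-- def string_sanitize(string, tab_width=8):
--     r"""
--     strips, and replaces non-printable characters
--
--     :param tab_width: number of spaces to replace tabs with. Read from
--                       `globals.tabwidth` setting if `None`
--     :type tab_width: int or `None`
--
--     >>> string_sanitize(' foo\rbar ', 8)
--     ' foobar '
--     >>> string_sanitize('foo\tbar', 8)
--     'foo     bar'
--     >>> string_sanitize('foo\t\tbar', 8)
--     'foo             bar'
--     """
--
--     string = string.replace('\r', '')
--
--     lines = list()
--     for line in string.split('\n'):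
--         tab_count = line.count('\t')
--
--         if tab_count > 0:
--             line_length = 0
--             new_line = list()
--             for i, chunk in enumerate(line.split('\t')):
--                 line_length += len(chunk)
--                 new_line.append(chunk)
--
--                 if i < tab_count:
--                     next_tab_stop_in = tab_width - (line_length % tab_width)
--                     new_line.append(' ' * next_tab_stop_in)
--                     line_length += next_tab_stop_in
--             lines.append(''.join(new_line))
--         else:
--             lines.append(line)
--
--     return '\n'.join(lines)
-- ===== SOURCE B (Python) =====
-- def string_sanitize(string, tab_width=8):
--     string = string.replace('\r', '')
--     out = []
--     col = 0
--     for ch in string: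
--         if ch == '\n':
--             out.append('\n')
--             col = 0
--         elif ch == '\t':
--             pad = tab_width - (col % tab_width)
--             out.append(' ' * pad)
--             col += pad
--         else:
--             out.append(ch)
--             col += 1
--     return ''.join(out)
-- ===== Notes on version B (the rewrite author's own statement) =====
-- stated objective: simpler
-- what changed: Replaces the split-on-newline / split-on-tab nested-loop structure with one flat left-to-right scan that maintains the current column and pads each tab to the next tab stop directly.
import Mathlib
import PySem

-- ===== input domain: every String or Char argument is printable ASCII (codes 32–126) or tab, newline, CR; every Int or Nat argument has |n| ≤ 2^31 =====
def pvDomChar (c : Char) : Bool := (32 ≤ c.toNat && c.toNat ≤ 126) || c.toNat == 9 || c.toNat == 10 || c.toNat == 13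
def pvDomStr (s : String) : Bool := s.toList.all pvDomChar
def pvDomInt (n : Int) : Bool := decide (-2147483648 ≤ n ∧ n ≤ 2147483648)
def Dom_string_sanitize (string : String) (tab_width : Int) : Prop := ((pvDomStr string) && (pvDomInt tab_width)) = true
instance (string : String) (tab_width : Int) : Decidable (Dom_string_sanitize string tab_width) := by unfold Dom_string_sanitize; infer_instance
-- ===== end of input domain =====

-- B replaces A's split-on-newline / split-on-tab nested loops by one flat scan
-- that tracks the current column; objective: simpler (same values everywhere A returns).


-- ===== PORT A =====
-- body of A's inner `for i, chunk in enumerate(line.split('\t'))` loop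
def pvStepA (tab_width tab_count : Int) (acc : Int × List (List Char)) (p : Int × List Char) :
    Int × List (List Char) :=
  let line_length := acc.1 + PySem.List.len p.2
  let new_line := acc.2 ++ [p.2]
  if p.1 < tab_count then
    let next_tab_stop_in := tab_width - PySem.Int.mod line_length tab_width
    (line_length + next_tab_stop_in, new_line ++ [List.replicate next_tab_stop_in.toNat ' '])
  else (line_length, new_line)

-- body of A's outer `for line in string.split('\n')` loop
def pvLineA (tab_width : Int) (line : List Char) : List Char :=
  let tab_count : Int := (PySem.Chars.count line ['\t'] : Int)
  if tab_count > 0 then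
    let st := (PySem.List.enumerate (PySem.Chars.splitOn line ['\t'])).foldl
      (pvStepA tab_width tab_count) ((0 : Int), ([] : List (List Char)))
    PySem.Chars.join [] st.2
  else line

def string_sanitize (string : String) (tab_width : Int) : String :=
  let s := PySem.Chars.replace string.toList ['\r'] []
  let lines := (PySem.Chars.splitOn s ['\n']).foldl
    (fun acc line => acc ++ [pvLineA tab_width line]) []
  String.mk (PySem.Chars.join ['\n'] lines)

-- ===== PORT B =====
-- body of B's single `for ch in string` loop: (output so far, current column)
def pvStepB (tab_width : Int) (acc : List Char × Int) (ch : Char) : List Char × Int :=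
  if ch = '\n' then (acc.1 ++ ['\n'], 0)
  else if ch = '\t' then
    let pad := tab_width - PySem.Int.mod acc.2 tab_width
    (acc.1 ++ List.replicate pad.toNat ' ', acc.2 + pad)
  else (acc.1 ++ [ch], acc.2 + 1)

def string_sanitize_alt (string : String) (tab_width : Int) : String :=
  let s := PySem.Chars.replace string.toList ['\r'] []
  String.mk ((s.foldl (pvStepB tab_width) (([] : List Char), (0 : Int))).1)

-- ===== PRECONDITION & SPEC =====
-- Pre_ excludes exactly the inputs where Python A raises ZeroDivisionError:
-- tab_width = 0 with a tab in the string (the modulo in the tab branch divides by 0).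
def Pre_string_sanitize (string : String) (tab_width : Int) : Prop :=
  '\t' ∈ string.toList → tab_width ≠ 0
instance (string : String) (tab_width : Int) : Decidable (Pre_string_sanitize string tab_width) := by
  unfold Pre_string_sanitize; infer_instance

def pvWitness_string_sanitize : String × Int := ("a\tb\nc", 8)

def Spec_string_sanitize (string : String) (tab_width : Int) (out : String) : Prop := out = string_sanitize_alt string tab_width
instance (string : String) (tab_width : Int) (out : String) : Decidable (Spec_string_sanitize string tab_width out) := by unfold Spec_string_sanitize; infer_instance

-- ===== CLAIM (what is proved, stated in full; the proofs are below) =====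
def Claim_equal_string_sanitize : Prop := ∀ (string : String) (tab_width : Int), Dom_string_sanitize string tab_width → Pre_string_sanitize string tab_width → Spec_string_sanitize string tab_width (string_sanitize string tab_width)

-- ===== LEMMAS AND PROOFS =====

-- reference form of split-on-a-single-character: (first piece, remaining pieces)
def pvSplitP (c : Char) : List Char → List Char × List (List Char)
  | [] => ([], [])
  | x :: xs =>
    let r := pvSplitP c xs
    if x = c then ([], r.1 :: r.2) else (x :: r.1, r.2)

-- reference char-by-char expansion with an explicit column
def pvE (tw : Int) : Int → List Char → List Char
  | _, [] => []
  | col, c :: cs =>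
    if c = '\n' then '\n' :: pvE tw 0 cs
    else if c = '\t' then
      (tw - PySem.Int.mod col tw).toNat.fold (fun _ _ l => ' ' :: l) (pvE tw (col + (tw - PySem.Int.mod col tw)) cs)
    else c :: pvE tw (col + 1) cs

-- reference chunk-by-chunk expansion (A's inner loop, denotationally)
def pvAexp (tw : Int) : Int → List (List Char) → List Char
  | _, [] => []
  | _, [k] => k
  | col, k :: k2 :: ks =>
    k ++ List.replicate (tw - PySem.Int.mod (col + k.length) tw).toNat ' '
      ++ pvAexp tw (col + k.length + (tw - PySem.Int.mod (col + k.length) tw)) (k2 :: ks)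

theorem pv_go_split (c : Char) : ∀ (l : List Char) (fuel : Nat) (cur : List Char)
    (acc : List (List Char)), l.length ≤ fuel →
    PySem.Chars.splitOn.go [c] fuel l cur acc
      = acc.reverse ++ (cur.reverse ++ (pvSplitP c l).1) :: (pvSplitP c l).2 := by
  intro l
  induction l with
  | nil =>
    intro fuel cur acc _
    cases fuel <;> simp [PySem.Chars.splitOn.go, pvSplitP]
  | cons x xs ih =>
    intro fuel cur acc h
    cases fuel with
    | zero => simp at h
    | succ f =>
      by_cases hx : x = c
      · subst hx
        have : PySem.Chars.splitOn.go [x] (f+1) (x::xs) cur acc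
            = PySem.Chars.splitOn.go [x] f xs [] (cur.reverse :: acc) := by
          simp [PySem.Chars.splitOn.go]
        rw [this, ih f [] (cur.reverse :: acc) (by simpa using h)]
        simp [pvSplitP]
      · have : PySem.Chars.splitOn.go [c] (f+1) (x::xs) cur acc
            = PySem.Chars.splitOn.go [c] f xs (x :: cur) acc := by
          simp [PySem.Chars.splitOn.go]
          intro h2; exact absurd h2.symm hx
        rw [this, ih f (x :: cur) acc (by simpa using h)]
        simp [pvSplitP, hx]

theorem pv_splitOn_singleton (c : Char) (l : List Char) :
    PySem.Chars.splitOn l [c] = (pvSplitP c l).1 :: (pvSplitP c l).2 := by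
  unfold PySem.Chars.splitOn
  rw [pv_go_split c l (l.length + 1) [] [] (by omega)]
  simp

theorem pv_count_go (c : Char) : ∀ (l : List Char) (fuel : Nat) (acc : Nat),
    l.length ≤ fuel → PySem.Chars.count.go [c] fuel l acc = acc + l.count c := by
  intro l
  induction l with
  | nil => intro fuel acc _; cases fuel <;> simp [PySem.Chars.count.go]
  | cons x xs ih =>
    intro fuel acc h
    cases fuel with
    | zero => simp at h
    | succ f =>
      by_cases hx : x = c
      · subst hx
        have : PySem.Chars.count.go [x] (f+1) (x::xs) acc
            = PySem.Chars.count.go [x] f xs (acc+1) := by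
          simp [PySem.Chars.count.go]
        rw [this, ih f (acc+1) (by simpa using h)]
        simp [List.count_cons]
        omega
      · have : PySem.Chars.count.go [c] (f+1) (x::xs) acc
            = PySem.Chars.count.go [c] f xs acc := by
          simp [PySem.Chars.count.go]
          intro h2; exact absurd h2.symm hx
        rw [this, ih f acc (by simpa using h)]
        simp [hx]

theorem pv_count_singleton (c : Char) (l : List Char) :
    PySem.Chars.count l [c] = l.count c := by
  unfold PySem.Chars.count
  simpa using pv_count_go c l l.length 0 le_rfl

theorem pv_splitP_chars (c : Char) : ∀ (l : List Char), ∀ p ∈ (pvSplitP c l).1 :: (pvSplitP c l).2,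
    ∀ x ∈ p, x ∈ l ∧ x ≠ c := by
  intro l
  induction l with
  | nil => simp [pvSplitP]
  | cons y ys ih =>
    intro p hp x hx
    by_cases hy : y = c
    · subst hy
      simp [pvSplitP] at hp
      rcases hp with hp | hp | hp
      · simp [hp] at hx
      · have := ih _ (by simp [hp]) x hx; simp [this.1, this.2]
      · have := ih _ (by simp; exact Or.inr hp) x hx; simp [this.1, this.2]
    · simp [pvSplitP, hy] at hp
      rcases hp with hp | hp
      · subst hp
        simp at hx
        rcases hx with hx | hx
        · subst hx; simp [hy]
        · have := ih _ (by simp) x hx; simp [this.1, this.2]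
      · have := ih _ (by simp; exact Or.inr hp) x hx; simp [this.1, this.2]

theorem pv_splitP_count (c : Char) : ∀ (l : List Char),
    (pvSplitP c l).2.length = l.count c := by
  intro l
  induction l with
  | nil => simp [pvSplitP]
  | cons y ys ih =>
    by_cases hy : y = c
    · subst hy; simp [pvSplitP, ih]
    · simp [pvSplitP, hy, ih]

theorem pv_splitP_join (c : Char) : ∀ (l : List Char),
    PySem.Chars.join [c] ((pvSplitP c l).1 :: (pvSplitP c l).2) = l := by
  intro l
  induction l with
  | nil => simp [pvSplitP, PySem.Chars.join_singleton]
  | cons y ys ih =>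
    by_cases hy : y = c
    · subst hy
      rw [show pvSplitP y (y::ys) = ([], (pvSplitP y ys).1 :: (pvSplitP y ys).2) from by
        simp [pvSplitP]]
      rw [PySem.Chars.join_cons_cons]
      simpa using ih
    · rw [show pvSplitP c (y::ys) = (y :: (pvSplitP c ys).1, (pvSplitP c ys).2) from by
        simp [pvSplitP, hy]]
      cases h2 : (pvSplitP c ys).2 with
      | nil =>
        rw [h2] at ih
        rw [PySem.Chars.join_singleton] at ih ⊢
        simp [ih]
      | cons q qs =>
        rw [h2] at ih
        rw [PySem.Chars.join_cons_cons] at ih ⊢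
        simp [ih]

theorem pv_splitP_not_mem (c : Char) : ∀ (l : List Char), c ∉ l → pvSplitP c l = (l, []) := by
  intro l
  induction l with
  | nil => simp [pvSplitP]
  | cons y ys ih =>
    intro h
    simp at h
    simp [pvSplitP, Ne.symm h.1, ih h.2]

theorem pv_splitP_append (c : Char) : ∀ (l r : List Char), c ∉ l →
    pvSplitP c (l ++ c :: r) = (l, (pvSplitP c r).1 :: (pvSplitP c r).2) := by
  intro l r
  induction l with
  | nil => simp [pvSplitP]
  | cons y ys ih =>
    intro h
    simp at h
    simp [pvSplitP, Ne.symm h.1, ih h.2]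

theorem pv_join_empty : ∀ (xs : List (List Char)), PySem.Chars.join [] xs = xs.flatten := by
  intro xs
  induction xs with
  | nil => simp [PySem.Chars.join_nil]
  | cons p ps ih =>
    cases ps with
    | nil => simp [PySem.Chars.join_singleton]
    | cons q qs => rw [PySem.Chars.join_cons_cons]; simp [ih]

-- pad as replicate (pvE writes the fold the port's replicate computes)
theorem pv_fold_replicate (n : Nat) (l : List Char) :
    n.fold (fun _ _ acc => ' ' :: acc) l = List.replicate n ' ' ++ l := by
  induction n with
  | zero => simp
  | succ m ih => simp [Nat.fold_succ, ih, List.replicate_succ]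

theorem pvE_tab (tw col : Int) (cs : List Char) :
    pvE tw col ('\t' :: cs)
      = List.replicate (tw - PySem.Int.mod col tw).toNat ' '
        ++ pvE tw (col + (tw - PySem.Int.mod col tw)) cs := by
  simp [pvE, pv_fold_replicate]

theorem pv_foldB (tw : Int) : ∀ (cs : List Char) (out : List Char) (col : Int),
    (cs.foldl (pvStepB tw) (out, col)).1 = out ++ pvE tw col cs := by
  intro cs
  induction cs with
  | nil => intro out col; simp [pvE]
  | cons c cs ih =>
    intro out col
    by_cases h1 : c = '\n'
    · subst h1
      rw [List.foldl_cons]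
      show (cs.foldl (pvStepB tw) (pvStepB tw (out, col) '\n')).1 = _
      rw [show pvStepB tw (out, col) '\n' = (out ++ ['\n'], 0) by simp [pvStepB]]
      rw [ih]
      simp [pvE]
    · by_cases h2 : c = '\t'
      · subst h2
        rw [List.foldl_cons]
        rw [show pvStepB tw (out, col) '\t'
            = (out ++ List.replicate (tw - PySem.Int.mod col tw).toNat ' ',
               col + (tw - PySem.Int.mod col tw)) by simp [pvStepB]]
        rw [ih, pvE_tab]
        simp
      · rw [List.foldl_cons]
        rw [show pvStepB tw (out, col) c = (out ++ [c], col + 1) by simp [pvStepB, h1, h2]]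
        rw [ih]
        simp [pvE, h1, h2]

theorem pvE_plain_append (tw : Int) : ∀ (k : List Char), (∀ x ∈ k, x ≠ '\n' ∧ x ≠ '\t') →
    ∀ (col : Int) (rest : List Char),
    pvE tw col (k ++ rest) = k ++ pvE tw (col + k.length) rest := by
  intro k
  induction k with
  | nil => intro _ col rest; simp
  | cons x xs ih =>
    intro h col rest
    have hx := h x (by simp)
    have hxs : ∀ y ∈ xs, y ≠ '\n' ∧ y ≠ '\t' := fun y hy => h y (by simp [hy])
    simp only [List.cons_append]
    rw [show pvE tw col (x :: (xs ++ rest)) = x :: pvE tw (col + 1) (xs ++ rest) by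
      simp [pvE, hx.1, hx.2]]
    rw [ih hxs]
    simp
    ring_nf

theorem pvE_plain (tw : Int) (k : List Char) (h : ∀ x ∈ k, x ≠ '\n' ∧ x ≠ '\t') (col : Int) :
    pvE tw col k = k := by
  have := pvE_plain_append tw k h col []
  simpa [pvE] using this

theorem pvE_newline_append (tw : Int) : ∀ (l : List Char), '\n' ∉ l → ∀ (col : Int) (r : List Char),
    pvE tw col (l ++ '\n' :: r) = pvE tw col l ++ '\n' :: pvE tw 0 r := by
  intro l
  induction l with
  | nil => intro _ col r; simp [pvE]
  | cons x xs ih =>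
    intro h col r
    simp at h
    by_cases h2 : x = '\t'
    · subst h2
      simp only [List.cons_append]
      rw [pvE_tab, pvE_tab, ih h.2]
      simp
    · simp only [List.cons_append]
      have hstep : ∀ m, pvE tw col (x :: m) = x :: pvE tw (col + 1) m := by
        intro m
        simp [pvE, h2, show ¬ x = '\n' from fun hh => h.1 hh.symm]
      rw [hstep, hstep, ih h.2]
      simp

theorem pv_foldA (tw tc : Int) : ∀ (chunks : List (List Char)) (s col : Int)
    (accL : List (List Char)), chunks ≠ [] → s + (chunks.length : Int) = tc + 1 →
    (((PySem.List.enumerate chunks s).foldl (pvStepA tw tc) (col, accL)).2).flatten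
      = accL.flatten ++ pvAexp tw col chunks := by
  intro chunks
  induction chunks with
  | nil => intro s col accL h; exact absurd rfl h
  | cons k rest ih =>
    intro s col accL _ hlen
    cases rest with
    | nil =>
      have hs : ¬ s < tc := by simp at hlen; omega
      rw [PySem.List.enumerate_cons, PySem.List.enumerate_nil]
      simp only [List.foldl_cons, List.foldl_nil]
      rw [show pvStepA tw tc (col, accL) (s, k) = (col + (k.length : Int), accL ++ [k]) from by
        simp [pvStepA, hs]]
      simp [pvAexp]
    | cons k2 ks =>
      have hs : s < tc := by
        simp only [List.length_cons] at hlen; push_cast at hlen; omega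
      rw [PySem.List.enumerate_cons]
      simp only [List.foldl_cons]
      rw [show pvStepA tw tc (col, accL) (s, k)
          = (col + (k.length : Int) + (tw - PySem.Int.mod (col + (k.length : Int)) tw),
             accL ++ [k] ++ [List.replicate (tw - PySem.Int.mod (col + (k.length : Int)) tw).toNat ' ']) from by
        simp [pvStepA, hs]]
      rw [ih (s+1) _ _ (by simp) (by simp only [List.length_cons] at hlen ⊢; push_cast at hlen ⊢; omega)]
      simp [pvAexp]

theorem pv_bridge (tw : Int) : ∀ (chunks : List (List Char)), chunks ≠ [] →
    (∀ p ∈ chunks, ∀ x ∈ p, x ≠ '\n' ∧ x ≠ '\t') → ∀ (col : Int),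
    pvAexp tw col chunks = pvE tw col (PySem.Chars.join ['\t'] chunks) := by
  intro chunks
  induction chunks with
  | nil => intro h; exact absurd rfl h
  | cons k rest ih =>
    intro _ hch col
    cases rest with
    | nil =>
      rw [PySem.Chars.join_singleton]
      rw [pvE_plain tw k (hch k (by simp)) col]
      simp [pvAexp]
    | cons k2 ks =>
      rw [PySem.Chars.join_cons_cons]
      rw [show k ++ ['\t'] ++ PySem.Chars.join ['\t'] (k2 :: ks)
          = k ++ ('\t' :: PySem.Chars.join ['\t'] (k2 :: ks)) from by simp]
      rw [pvE_plain_append tw k (hch k (by simp)) col, pvE_tab]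
      rw [← ih (by simp) (fun p hp => hch p (by simp [hp]))]
      simp [pvAexp]

theorem pv_lineA (tw : Int) (line : List Char) (h : '\n' ∉ line) :
    pvLineA tw line = pvE tw 0 line := by
  simp only [pvLineA, pv_count_singleton]
  by_cases hc : 0 < line.count '\t'
  · rw [if_pos (by exact_mod_cast hc)]
    rw [pv_splitOn_singleton, pv_join_empty]
    rw [pv_foldA tw (line.count '\t') _ 0 0 [] (by simp)
      (by simp [pv_splitP_count])]
    rw [pv_bridge tw _ (by simp)
      (fun p hp x hx => by
        have h2 := pv_splitP_chars '\t' line p hp x hx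
        exact ⟨fun hn => h (hn ▸ h2.1), h2.2⟩)]
    rw [pv_splitP_join]
    simp
  · rw [if_neg (by exact_mod_cast hc)]
    have ht : '\t' ∉ line := by
      intro hm; exact hc (List.count_pos_iff.mpr hm)
    exact (pvE_plain tw line (fun x hx =>
      ⟨fun hn => h (hn ▸ hx), fun hn => ht (hn ▸ hx)⟩) 0).symm

theorem pv_exists_split (c : Char) : ∀ (cs : List Char), c ∈ cs →
    ∃ l r, c ∉ l ∧ cs = l ++ c :: r := by
  intro cs
  induction cs with
  | nil => simp
  | cons x xs ih =>
    intro h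
    by_cases hx : x = c
    · exact ⟨[], xs, by simp, by simp [hx]⟩
    · rcases ih (by rcases List.mem_cons.mp h with h | h; exact absurd h.symm hx; exact h) with
        ⟨l, r, hl, hr⟩
      exact ⟨x :: l, r, by simp [hl]; exact fun hh => hx hh.symm, by simp [hr]⟩

theorem pv_main (tw : Int) : ∀ (n : Nat) (cs : List Char), cs.length ≤ n →
    PySem.Chars.join ['\n']
        (((pvSplitP '\n' cs).1 :: (pvSplitP '\n' cs).2).map (pvLineA tw))
      = pvE tw 0 cs := by
  intro n
  induction n with
  | zero =>
    intro cs h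
    rw [List.length_eq_zero_iff.mp (Nat.le_zero.mp h)]
    simp [pvSplitP, PySem.Chars.join_singleton, pvE, pvLineA, PySem.Chars.count]
  | succ m ih =>
    intro cs h
    by_cases hm : '\n' ∈ cs
    · rcases pv_exists_split '\n' cs hm with ⟨l, r, hl, hr⟩
      subst hr
      rw [pv_splitP_append '\n' l r hl]
      simp only [List.map_cons]
      rw [PySem.Chars.join_cons_cons]
      have hr_len : r.length ≤ m := by simp at h; omega
      have ihr := ih r hr_len
      rw [List.map_cons] at ihr
      rw [ihr]
      rw [pv_lineA tw l hl, pvE_newline_append tw l hl]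
      simp
    · rw [pv_splitP_not_mem '\n' cs hm]
      rw [List.map_cons, List.map_nil, PySem.Chars.join_singleton]
      exact pv_lineA tw cs hm

-- ===== VERDICT (by name: the statement is the Claim_ definition above) =====
theorem string_sanitize_spec : Claim_equal_string_sanitize := by
  intro s tw _ _
  simp only [Spec_string_sanitize, string_sanitize, string_sanitize_alt]
  rw [pv_foldB, PySem.List.foldl_append_singleton_eq_map, pv_splitOn_singleton, List.nil_append]
  rw [pv_main tw (PySem.Chars.replace s.toList ['\r'] []).length _ le_rfl]
  simp
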